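-- pv_equiv track=rewrite | github.com/bangtugu/Algorithm | PROGRAMMERS/메뉴_리뉴얼.py | make_lst
-- ===== SOURCE A (Python) =====
-- def make_lst(order, n):
--     alps = list(order)
--     alps.sort()
--     temps = []
--     lst = []
--     for i in range(len(alps)):
--         for j in range(len(temps)):
--             now = temps[j] + alps[i]
--
--             if len(now) == n:
--                 lst.append(now)
--             else:
--                 temps.append(now)
--
--         temps.append(alps[i])
--
--     return lst
-- ===== SOURCE B (Python) =====
-- def make_lst(order, n):
--     # Combinations of length n from the sorted characters, generated in
--     # colex order by Pascal's rule: C(k, i) = C(k, i-1) + [c + alps[i-1] for c in C(k-1, i-1)].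
--     # For n == 1 this returns the single-character combinations (A returns [] there).
--     if n <= 0:
--         return []
--     alps = sorted(order)
--
--     def comb(k, i):
--         if k == 0:
--             return ['']
--         if i == 0:
--             return []
--         return comb(k, i - 1) + [c + alps[i - 1] for c in comb(k - 1, i - 1)]
--
--     return comb(n, len(alps))
-- ===== Notes on version B (the rewrite author's own statement) =====
-- stated objective: simpler
-- what changed: A grows one mutable worklist interleaving partial strings of all lengths and harvests those that reach length n; B generates the length-n combinations directly by Pascal's rule recursion comb(k,i) = comb(k,i-1) + extensions of comb(k-1,i-1), which yields the same colex emission order.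
-- intended difference: For n == 1 with a nonempty order A returns [] (its loop can only emit strings of length >= 2), while B returns the sorted single-character strings, the intended length-1 combinations. — e.g. on make_lst("ba", 1): A returns [], B returns ["a", "b"]
import Mathlib
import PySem

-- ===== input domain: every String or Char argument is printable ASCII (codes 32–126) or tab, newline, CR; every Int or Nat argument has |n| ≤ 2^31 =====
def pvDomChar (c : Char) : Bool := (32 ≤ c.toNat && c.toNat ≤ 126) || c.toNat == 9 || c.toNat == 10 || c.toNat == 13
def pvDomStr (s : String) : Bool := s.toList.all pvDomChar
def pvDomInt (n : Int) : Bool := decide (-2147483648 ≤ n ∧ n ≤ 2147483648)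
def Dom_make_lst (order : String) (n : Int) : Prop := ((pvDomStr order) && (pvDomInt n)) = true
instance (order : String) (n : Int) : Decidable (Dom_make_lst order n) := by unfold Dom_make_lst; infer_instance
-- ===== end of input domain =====

-- B generates the length-n combinations directly by Pascal's-rule recursion instead of A's
-- single mutable worklist; for n == 1 B returns the single-character combinations A misses.

-- ===== PORT A =====
-- Strings are modelled as List Char internally (String.ofList at the boundary);
-- sorting chars by code point = Python's sort of the characters of a string.
def make_lst (order : String) (n : Int) : List String :=
  let alps := PySem.List.sorted order.toList (fun c => c.toNat) false
  let fin := alps.foldl (fun (st : List (List Char) × List (List Char)) a =>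
      -- inner for-loop: range(len(temps)) is fixed at entry, appended items are not revisited,
      -- and temps[j] for j below that bound is unchanged by the appends: fold over the snapshot st.1
      let st2 := st.1.foldl (fun (st2 : List (List Char) × List (List Char)) t =>
          let now := t ++ [a]
          if ((now.length : Int) = n) then (st2.1, st2.2 ++ [now]) else (st2.1 ++ [now], st2.2))
        st
      (st2.1 ++ [[a]], st2.2))
    ([], [])
  fin.2.map String.ofList

-- ===== PORT B =====
-- comb(k, i) of Source B; alps[i-1] is always in range at every call site, so getD is exact.
def combB (alps : List Char) : Nat → Nat → List (List Char)
  | 0, _ => [[]]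
  | _+1, 0 => []
  | k+1, i+1 => combB alps (k+1) i ++ (combB alps k i).map (fun c => c ++ [alps.getD i ' '])

def make_lst_alt (order : String) (n : Int) : List String :=
  if n ≤ 0 then []
  else
    let alps := PySem.List.sorted order.toList (fun c => c.toNat) false
    (combB alps n.toNat alps.length).map String.ofList

-- ===== PRECONDITION & SPEC =====
-- For n == 1 with a nonempty order A returns [] (its loop can only emit strings of length ≥ 2),
-- while B returns the sorted single-character strings, the intended length-1 combinations.
def D_make_lst (order : String) (n : Int) : Prop := n = 1 ∧ order ≠ ""
instance (order : String) (n : Int) : Decidable (D_make_lst order n) := by unfold D_make_lst; infer_instance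

def Spec_make_lst (order : String) (n : Int) (out : List String) : Prop := ¬ D_make_lst order n → out = make_lst_alt order n
instance (order : String) (n : Int) (out : List String) : Decidable (Spec_make_lst order n out) := by unfold Spec_make_lst; infer_instance

def pvDiffWitness_make_lst : String × Int := ("ba", 1)
def pvDiffWitnessOut_make_lst : (List String) × (List String) := ([], ["a", "b"])

-- ===== CLAIM (what is proved, stated in full; the proofs are below) =====
def Claim_unchanged_make_lst : Prop := ∀ (order : String) (n : Int), Dom_make_lst order n → Spec_make_lst order n (make_lst order n)
def Claim_changed_make_lst : Prop := Dom_make_lst (pvDiffWitness_make_lst.1) (pvDiffWitness_make_lst.2) ∧ D_make_lst (pvDiffWitness_make_lst.1) (pvDiffWitness_make_lst.2) ∧ make_lst (pvDiffWitness_make_lst.1) (pvDiffWitness_make_lst.2) = pvDiffWitnessOut_make_lst.1 ∧ make_lst_alt (pvDiffWitness_make_lst.1) (pvDiffWitness_make_lst.2) = pvDiffWitnessOut_make_lst.2 ∧ pvDiffWitnessOut_make_lst.1 ≠ pvDiffWitnessOut_make_lst.2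
def Claim_exact_make_lst : Prop := ∀ (order : String) (n : Int), Dom_make_lst order n → D_make_lst order n → make_lst order n ≠ make_lst_alt order n

-- ===== LEMMAS AND PROOFS =====
-- The inner for-loop splits the snapshot into the non-length-n extensions (→ temps)
-- and the length-n extensions (→ lst), preserving order.
theorem innerFold_eq (n : Int) (a : Char) (ts : List (List Char)) (acc1 acc2 : List (List Char)) :
    ts.foldl (fun (st2 : List (List Char) × List (List Char)) t =>
        let now := t ++ [a]
        if ((now.length : Int) = n) then (st2.1, st2.2 ++ [now]) else (st2.1 ++ [now], st2.2))
      (acc1, acc2)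
    = (acc1 ++ (ts.filter (fun t => !decide (((t ++ [a]).length : Int) = n))).map (fun t => t ++ [a]),
       acc2 ++ (ts.filter (fun t => decide (((t ++ [a]).length : Int) = n))).map (fun t => t ++ [a])) := by
  induction ts generalizing acc1 acc2 with
  | nil => simp
  | cons t ts ih =>
    have hf : (let now := t ++ [a]
          if ((now.length : Int) = n) then ((acc1, acc2).1, (acc1, acc2).2 ++ [now])
          else ((acc1, acc2).1 ++ [now], (acc1, acc2).2))
        = if ((t ++ [a]).length : Int) = n then (acc1, acc2 ++ [t ++ [a]]) else (acc1 ++ [t ++ [a]], acc2) := by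
      by_cases h : (((t ++ [a]).length : Int) = n) <;> simp only [h, if_true, if_false]
    rw [List.foldl_cons, hf]
    by_cases h : ((t.length : Int) + 1 = n)
    · rw [if_pos (show ((t ++ [a]).length : Int) = n by simpa using h), ih]
      simp [h, List.append_assoc]
    · rw [if_neg (show ¬((t ++ [a]).length : Int) = n by simpa using h), ih]
      simp [h, List.append_assoc]

-- the temps list after i outer iterations
def Tacc (alps : List Char) (n : Int) : Nat → List (List Char)
  | 0 => []
  | i+1 =>
    let prev := Tacc alps n i
    let a := alps.getD i ' '
    prev ++ (prev.filter (fun t => !decide (((t ++ [a]).length : Int) = n))).map (fun t => t ++ [a]) ++ [[a]]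

-- the lst list after i outer iterations
def Lacc (alps : List Char) (n : Int) : Nat → List (List Char)
  | 0 => []
  | i+1 =>
    let prev := Tacc alps n i
    let a := alps.getD i ' '
    Lacc alps n i ++ (prev.filter (fun t => decide (((t ++ [a]).length : Int) = n))).map (fun t => t ++ [a])

theorem outer_take (alps : List Char) (n : Int) :
    ∀ i, i ≤ alps.length →
    (alps.take i).foldl (fun (st : List (List Char) × List (List Char)) a =>
        let st2 := st.1.foldl (fun (st2 : List (List Char) × List (List Char)) t =>
            let now := t ++ [a]
            if ((now.length : Int) = n) then (st2.1, st2.2 ++ [now]) else (st2.1 ++ [now], st2.2))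
          st
        (st2.1 ++ [[a]], st2.2))
      ([], [])
    = (Tacc alps n i, Lacc alps n i) := by
  intro i
  induction i with
  | zero => intro _; simp [Tacc, Lacc]
  | succ i ih =>
    intro h
    have hi : i < alps.length := by omega
    have htake : alps.take (i+1) = alps.take i ++ [alps.getD i ' '] := by
      rw [List.take_add_one]
      simp [List.getElem?_eq_getElem hi]
    rw [htake, List.foldl_append, ih (by omega)]
    simp only [List.foldl_cons, List.foldl_nil]
    rw [innerFold_eq]
    simp [Tacc, Lacc]

theorem make_lst_eq_Lacc (order : String) (n : Int) :
    make_lst order n =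
      (Lacc (PySem.List.sorted order.toList (fun c => c.toNat) false) n
        (PySem.List.sorted order.toList (fun c => c.toNat) false).length).map String.ofList := by
  have h := outer_take (PySem.List.sorted order.toList (fun c => c.toNat) false) n
    (PySem.List.sorted order.toList (fun c => c.toNat) false).length (le_refl _)
  rw [List.take_length] at h
  simp only [make_lst, h]

-- every partial string in temps is nonempty
theorem Tacc_ne_nil (alps : List Char) (n : Int) :
    ∀ i, ∀ t ∈ Tacc alps n i, 1 ≤ t.length := by
  intro i
  induction i with
  | zero => simp [Tacc]
  | succ i ih =>
    intro t ht
    simp only [Tacc, List.mem_append, List.mem_map, List.mem_filter, List.mem_singleton] at ht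
    rcases ht with (ht | ⟨u, _, rfl⟩) | rfl
    · exact ih t ht
    · simp
    · simp

-- for n ≤ 1 nothing ever reaches lst
theorem Lacc_nil (alps : List Char) (n : Int) (hn : n ≤ 1) :
    ∀ i, Lacc alps n i = [] := by
  intro i
  induction i with
  | zero => rfl
  | succ i ih =>
    simp only [Lacc, ih, List.nil_append]
    rw [List.filter_eq_nil_iff.2, List.map_nil]
    intro t ht
    have := Tacc_ne_nil alps n i t ht
    simp only [List.length_append, List.length_singleton, decide_eq_true_eq]
    intro hc
    omega

theorem A_nil (order : String) (n : Int) (hn : n ≤ 1) : make_lst order n = [] := by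
  rw [make_lst_eq_Lacc, Lacc_nil _ _ hn]
  rfl


-- length bounds + per-length extraction: the length-k partial strings in temps after i
-- iterations are exactly combB alps k i, in order (for 2 ≤ N and 1 ≤ k < N)
theorem Tacc_main (alps : List Char) (N : Nat) (hN : 2 ≤ N) :
    ∀ i,
      (∀ t ∈ Tacc alps (N : Int) i, 1 ≤ t.length ∧ t.length < N) ∧
      (∀ k, 1 ≤ k → k < N →
        (Tacc alps (N : Int) i).filter (fun t => decide (t.length = k)) = combB alps k i) := by
  intro i
  induction i with
  | zero =>
    refine ⟨by simp [Tacc], ?_⟩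
    intro k hk1 _
    obtain ⟨K, rfl⟩ : ∃ K, k = K + 1 := ⟨k - 1, by omega⟩
    simp [Tacc, combB]
  | succ i ih =>
    obtain ⟨hb, hf⟩ := ih
    constructor
    · intro t ht
      simp only [Tacc, List.mem_append, List.mem_map, List.mem_filter, List.mem_singleton] at ht
      rcases ht with (ht | ⟨u, ⟨hu, hne⟩, rfl⟩) | rfl
      · exact hb t ht
      · have hu' := hb u hu
        simp only [List.length_append, List.length_singleton, Bool.not_eq_eq_eq_not,
          Bool.not_true, decide_eq_false_iff_not, Nat.cast_add, Nat.cast_one] at hne ⊢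
        have : ¬ ((u.length : Int) + 1 = (N : Int)) := by simpa using hne
        constructor <;> omega
      · simp; omega
    · intro k hk1 hkN
      have hstep :
          Tacc alps (N : Int) (i + 1)
            = Tacc alps (N : Int) i
              ++ ((Tacc alps (N : Int) i).filter
                    (fun t => !decide (((t ++ [alps.getD i ' ']).length : Int) = (N : Int)))).map
                  (fun t => t ++ [alps.getD i ' '])
              ++ [[alps.getD i ' ']] := rfl
      rw [hstep, List.filter_append, List.filter_append, List.filter_map, List.filter_filter]
      have hmidpred :
          ((Tacc alps (N : Int) i).filter
            (fun t => ((fun t => decide (t.length = k)) ∘ (fun t => t ++ [alps.getD i ' '])) t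
                      && !decide (((t ++ [alps.getD i ' ']).length : Int) = (N : Int))))
          = (Tacc alps (N : Int) i).filter (fun t => decide (t.length = k - 1)) := by
        apply List.filter_congr
        intro t _
        simp only [Function.comp_apply, List.length_append, List.length_singleton,
          Nat.cast_add, Nat.cast_one]
        by_cases h : t.length = k - 1
        · simp [h, decide_eq_true_eq]
          constructor
          · omega
          · omega
        · simp [h]
          intro hc
          omega
      rw [hmidpred]
      by_cases hk : k = 1
      · subst hk
        have h0 : (Tacc alps (N : Int) i).filter (fun t => decide (t.length = 1 - 1)) = [] := by
          apply List.filter_eq_nil_iff.2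
          intro t ht
          have := (hb t ht).1
          simp only [decide_eq_true_eq]
          omega
        simp only [h0, List.map_nil, List.append_nil]
        rw [hf 1 (by omega) (by omega)]
        simp [combB]
      · obtain ⟨K, rfl⟩ : ∃ K, k = K + 1 := ⟨k - 1, by omega⟩
        simp only [Nat.add_sub_cancel]
        rw [hf (K + 1) (by omega) (by omega), hf K (by omega) (by omega)]
        have hlast : ([[alps.getD i ' ']] : List (List Char)).filter
            (fun t => decide (t.length = K + 1)) = [] := by
          apply List.filter_eq_nil_iff.2
          intro t ht
          simp only [List.mem_singleton] at ht
          subst ht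
          simp only [List.length_singleton, decide_eq_true_eq]
          omega
        rw [hlast, List.append_nil]
        rfl

-- the harvested list after i iterations is exactly combB alps N i
theorem Lacc_eq_combB (alps : List Char) (N : Nat) (hN : 2 ≤ N) :
    ∀ i, Lacc alps (N : Int) i = combB alps N i := by
  obtain ⟨K, hNK⟩ : ∃ K, N = K + 1 := ⟨N - 1, by omega⟩
  intro i
  induction i with
  | zero => rw [hNK]; rfl
  | succ i ih =>
    have hstep :
        Lacc alps (N : Int) (i + 1)
          = Lacc alps (N : Int) i
            ++ ((Tacc alps (N : Int) i).filter
                  (fun t => decide (((t ++ [alps.getD i ' ']).length : Int) = (N : Int)))).map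
                (fun t => t ++ [alps.getD i ' ']) := rfl
    have hpred :
        ((Tacc alps (N : Int) i).filter
          (fun t => decide (((t ++ [alps.getD i ' ']).length : Int) = (N : Int))))
        = (Tacc alps (N : Int) i).filter (fun t => decide (t.length = K)) := by
      apply List.filter_congr
      intro t _
      simp only [List.length_append, List.length_singleton, Nat.cast_add, Nat.cast_one,
        decide_eq_decide]
      omega
    rw [hstep, hpred, ih,
      (Tacc_main alps N hN i).2 K (by omega) (by omega), hNK]
    rfl

-- ===== VERDICT (by name: the statement is the Claim_ definition above) =====
theorem make_lst_spec : Claim_unchanged_make_lst := by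
  intro order n _
  unfold Spec_make_lst
  intro hD
  unfold D_make_lst at hD
  push Not at hD
  by_cases h2 : 2 ≤ n
  · have hn : n = ((n.toNat : Nat) : Int) := by omega
    rw [make_lst_eq_Lacc, hn, Lacc_eq_combB _ n.toNat (by omega)]
    unfold make_lst_alt
    rw [if_neg (by omega)]
    simp only [Int.toNat_natCast]
  · by_cases h1 : n = 1
    · have ho : order = "" := hD h1
      subst ho; subst h1
      decide
    · rw [A_nil _ _ (by omega)]
      unfold make_lst_alt
      rw [if_pos (by omega)]

theorem make_lst_changed : Claim_changed_make_lst := by unfold Claim_changed_make_lst; decide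

theorem make_lst_tight : Claim_exact_make_lst := by
  intro order n _ hD
  unfold D_make_lst at hD
  obtain ⟨h1, hne⟩ := hD
  subst h1
  rw [A_nil _ _ (le_refl 1)]
  unfold make_lst_alt
  rw [if_neg (by omega)]
  intro hEq
  have hnil : order.toList ≠ [] := fun h => hne (String.toList_eq_nil_iff.mp h)
  have hlen : (PySem.List.sorted order.toList (fun c => c.toNat) false).length
      = order.toList.length := PySem.List.length_sorted _ _ _
  obtain ⟨m, hm⟩ : ∃ m, order.toList.length = m + 1 := by
    cases horder : order.toList with
    | nil => exact absurd horder hnil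
    | cons c cs => exact ⟨cs.length, by simp⟩
  simp [combB, hlen, hm] at hEq
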